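-- pv_equiv track=rewrite | github.com/gginesta/clawdbot-railway-template | scripts/daily_standup.py | _find_todoist_id
-- ===== SOURCE A (Python) =====
-- def _find_todoist_id(all_tasks: list, title: str) -> str | None:
--     """Fuzzy match task title → Todoist task id."""
--     title_lower = title.lower().strip()
--     # Exact match first
--     for t in all_tasks:
--         if t.get("content","").lower().strip() == title_lower:
--             return t["id"]
--     # Partial match (title starts with or contains)
--     for t in all_tasks:
--         c = t.get("content","").lower()
--         if title_lower[:30] in c or c[:30] in title_lower:
--             return t["id"]
--     return None
-- ===== SOURCE B (Python) =====
-- def _find_todoist_id(all_tasks: list, title: str) -> str | None: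
--     """Fuzzy match task title -> Todoist task id (single pass, deferred partial fallback)."""
--     title_lower = title.lower().strip()
--     partial_task = None
--     for t in all_tasks:
--         c = t.get("content", "").lower()
--         if c.strip() == title_lower:
--             return t["id"]
--         if partial_task is None and (title_lower[:30] in c or c[:30] in title_lower):
--             partial_task = t
--     return partial_task["id"] if partial_task is not None else None
-- ===== Notes on version B (the rewrite author's own statement) =====
-- stated objective: alternative
-- what changed: Replaces A's two separate scans (exact-match pass, then a restarted partial-match pass) with a single traversal that returns on the first exact match and records the first partial match in a deferred accumulator returned after the loop.
import Mathlib
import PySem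

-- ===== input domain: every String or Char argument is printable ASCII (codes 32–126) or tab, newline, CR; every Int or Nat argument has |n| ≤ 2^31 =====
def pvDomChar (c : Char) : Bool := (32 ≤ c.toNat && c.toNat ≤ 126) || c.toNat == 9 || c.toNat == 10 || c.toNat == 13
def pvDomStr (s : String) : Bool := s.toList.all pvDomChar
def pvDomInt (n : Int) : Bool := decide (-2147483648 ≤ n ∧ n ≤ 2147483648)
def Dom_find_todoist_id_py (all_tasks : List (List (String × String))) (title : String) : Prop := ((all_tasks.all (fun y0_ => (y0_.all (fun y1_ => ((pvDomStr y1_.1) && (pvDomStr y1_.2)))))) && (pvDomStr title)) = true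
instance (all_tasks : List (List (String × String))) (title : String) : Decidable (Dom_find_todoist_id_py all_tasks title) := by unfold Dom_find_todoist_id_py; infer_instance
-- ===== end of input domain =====

-- B fuses A's two scans (exact pass, then restarted partial pass) into one traversal with a
-- deferred first-partial-match accumulator; same asymptotic cost ("alternative" objective).


-- ===== PORT A =====
-- t["id"]: Python raises KeyError when the key is missing; the port totalizes with
-- ((Dict.mk t).get? "id").getD "" — that default is unreachable under Pre_ (which excludes the raising inputs).
-- first loop: exact match scan; item found = the returned value (a string id)
def pvA_exactScan (all_tasks : List (List (String × String))) (title_lower : String) :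
    Option (Option String) :=
  match all_tasks with
  | [] => none
  | t :: rest =>
    if PySem.Str.strip (PySem.Str.lower (PySem.Dict.getD (PySem.Dict.mk t) "content" "")) = title_lower
    then some (some (((PySem.Dict.mk t).get? "id").getD ""))
    else pvA_exactScan rest title_lower

-- second loop: partial match scan
def pvA_partialScan (all_tasks : List (List (String × String))) (title_lower : String) :
    Option (Option String) :=
  match all_tasks with
  | [] => none
  | t :: rest =>
    let c := PySem.Str.lower (PySem.Dict.getD (PySem.Dict.mk t) "content" "")
    if PySem.Str.isIn (PySem.Str.slice title_lower none (some 30)) c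
        || PySem.Str.isIn (PySem.Str.slice c none (some 30)) title_lower
    then some (some (((PySem.Dict.mk t).get? "id").getD ""))
    else pvA_partialScan rest title_lower

def find_todoist_id_py (all_tasks : List (List (String × String))) (title : String) : Option String :=
  let title_lower := PySem.Str.strip (PySem.Str.lower title)
  match pvA_exactScan all_tasks title_lower with
  | some r => r
  | none =>
    match pvA_partialScan all_tasks title_lower with
    | some r => r
    | none => none

-- ===== PORT B =====
-- single pass; partial_task is the deferred first partial match (B's t["id"] totalized the same way)
def pvB_go (all_tasks : List (List (String × String))) (title_lower : String)
    (partial_task : Option (List (String × String))) : Option String :=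
  match all_tasks with
  | [] =>
    match partial_task with
    | some t => some (((PySem.Dict.mk t).get? "id").getD "")
    | none => none
  | t :: rest =>
    let c := PySem.Str.lower (PySem.Dict.getD (PySem.Dict.mk t) "content" "")
    if PySem.Str.strip c = title_lower
    then some (((PySem.Dict.mk t).get? "id").getD "")
    else
      pvB_go rest title_lower
        (if partial_task.isNone
            && (PySem.Str.isIn (PySem.Str.slice title_lower none (some 30)) c
                || PySem.Str.isIn (PySem.Str.slice c none (some 30)) title_lower)
         then some t else partial_task)

def find_todoist_id_py_alt (all_tasks : List (List (String × String))) (title : String) : Option String :=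
  pvB_go all_tasks (PySem.Str.strip (PySem.Str.lower title)) none

-- ===== PRECONDITION & SPEC =====
-- predicates used only by Pre_ (when does A access t["id"]?)
def pvExactCond (title_lower : String) (t : List (String × String)) : Bool :=
  PySem.Str.strip (PySem.Str.lower (PySem.Dict.getD (PySem.Dict.mk t) "content" "")) == title_lower
def pvPartialCond (title_lower : String) (t : List (String × String)) : Bool :=
  let c := PySem.Str.lower (PySem.Dict.getD (PySem.Dict.mk t) "content" "")
  PySem.Str.isIn (PySem.Str.slice title_lower none (some 30)) c
    || PySem.Str.isIn (PySem.Str.slice c none (some 30)) title_lower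
-- Pre_ excludes exactly the inputs on which A raises KeyError: the task the fuzzy match selects
-- (the first exact match if one exists, otherwise the first partial match) has no "id" key.
def Pre_find_todoist_id_py (all_tasks : List (List (String × String))) (title : String) : Prop :=
  (let tl := PySem.Str.strip (PySem.Str.lower title)
   match all_tasks.find? (pvExactCond tl) with
   | some t => (PySem.Dict.mk t).contains "id"
   | none =>
     match all_tasks.find? (pvPartialCond tl) with
     | some t => (PySem.Dict.mk t).contains "id"
     | none => true) = true
instance (all_tasks : List (List (String × String))) (title : String) : Decidable (Pre_find_todoist_id_py all_tasks title) := by unfold Pre_find_todoist_id_py; infer_instance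

def pvWitness_find_todoist_id_py : (List (List (String × String))) × String :=
  ([[("content", "a"), ("id", "1")]], "a")

def Spec_find_todoist_id_py (all_tasks : List (List (String × String))) (title : String) (out : Option String) : Prop := out = find_todoist_id_py_alt all_tasks title
instance (all_tasks : List (List (String × String))) (title : String) (out : Option String) : Decidable (Spec_find_todoist_id_py all_tasks title out) := by unfold Spec_find_todoist_id_py; infer_instance

-- ===== CLAIM (what is proved, stated in full; the proofs are below) =====
def Claim_equal_find_todoist_id_py : Prop := ∀ (all_tasks : List (List (String × String))) (title : String), Dom_find_todoist_id_py all_tasks title → Pre_find_todoist_id_py all_tasks title → Spec_find_todoist_id_py all_tasks title (find_todoist_id_py all_tasks title)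

-- ===== LEMMAS AND PROOFS =====
-- loop invariant of B's single pass: it equals A's exact scan, falling back to the recorded
-- partial task, falling back to A's partial scan of the remaining list
lemma pvB_go_spec (all_tasks : List (List (String × String))) (tl : String)
    (pt : Option (List (String × String))) :
    pvB_go all_tasks tl pt =
      match pvA_exactScan all_tasks tl with
      | some r => r
      | none =>
        match pt with
        | some t => some (((PySem.Dict.mk t).get? "id").getD "")
        | none =>
          match pvA_partialScan all_tasks tl with
          | some r => r
          | none => none := by
  induction all_tasks generalizing pt with
  | nil => cases pt <;> simp [pvB_go, pvA_exactScan, pvA_partialScan]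
  | cons t rest ih =>
    simp only [pvB_go, pvA_exactScan, pvA_partialScan]
    by_cases hx :
        PySem.Str.strip (PySem.Str.lower (PySem.Dict.getD (PySem.Dict.mk t) "content" "")) = tl
    · simp [hx]
    · simp only [hx, if_false, ih]
      cases pt with
      | some t0 => simp
      | none => split_ifs <;> simp_all

-- ===== VERDICT (by name: the statement is the Claim_ definition above) =====
theorem find_todoist_id_py_spec : Claim_equal_find_todoist_id_py := by
  intro all_tasks title _ _
  unfold Spec_find_todoist_id_py find_todoist_id_py find_todoist_id_py_alt
  rw [pvB_go_spec]
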